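-- pv_equiv track=rewrite | github.com/lyy1119/PythonLib | lyy19Lib/mathFunction.py | __string_to_polynomial
-- ===== SOURCE A (Python) =====
-- from collections import deque
--
-- def __string_to_polynomial(s: str):
--     '''
--     return res = [
--         ["-3" , "x^1"],
--         ... ...
--     ]
--     '''
--     res = []
--     queue = deque()
--     empty = False # 用于解析最后一个单项式及循环的退出
--     filtered = False # 遇到左括号开启，右括号关闭（对于负次数）
--     s = list(s)
--     while True:
--         if s:
--             i = s.pop(0)
--         else:
--             empty = True
--         if ( (empty) or i == "+" or i == "-") and (not filtered):
--             # 出栈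
--             # 出栈结果是一个单项式
--             monomial = [""]
--             while queue:
--                 # 系数、变量、次数
--                 # 系数、变量及次数之间使用*号隔开
--                 # -xn需要特殊处理
--                 j = queue.popleft()
--                 if j == "*":
--                     monomial.append("")
--                 else: # j != "*":
--                     # 加到monomial最后一个
--                     # 特殊处理-xn
--                     if (j == "-" or j == '+') and queue[0] == "x":
--                         monomial[-1] = j + "1"
--                         # 为下一个，即xn开新的元素
--                         monomial.append("")
--                         pass
--                     else:
--                         monomial[-1] = monomial[-1] + j
--             # 单项式解析完毕
--             if monomial != [""]:
--                 res.append(monomial)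
--         # 将正负号也进栈,左右括号不进栈
--         if i == '(':
--             filtered = True
--         elif i == ')':
--             filtered = False
--         elif i != ' ': # 筛去空格
--             queue.append(i)
--         if empty:
--             break
--     return res
-- ===== SOURCE B (Python) =====
-- # B: two-pass decomposition — first split into monomial substrings at top-level signs,
-- # then parse each substring into tokens; no shared char queue.
-- def __string_to_polynomial(s: str):
--     segs, cur, filtered = [], "", False
--     for c in s:
--         if c == '(':
--             filtered = True
--         elif c == ')':
--             filtered = False
--         elif c in '+-' and not filtered:
--             segs.append(cur)
--             cur = c
--         elif c != ' ':
--             cur += c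
--     if not filtered:
--         segs.append(cur)
--     res = []
--     for seg in segs:
--         mono = _parse_monomial(seg)
--         if mono != ['']:
--             res.append(mono)
--     return res
--
-- def _parse_monomial(seg: str):
--     tokens = ['']
--     n = len(seg)
--     for k in range(n):
--         c = seg[k]
--         if c == '*':
--             tokens.append('')
--         elif c in '+-' and k + 1 < n and seg[k + 1] == 'x':
--             tokens[-1] = c + '1'
--             tokens.append('')
--         else:
--             tokens[-1] += c
--     return tokens
-- ===== Notes on version B (the rewrite author's own statement) =====
-- stated objective: faster
-- what changed: Replaced A's single interleaved loop (popping chars off the front of a list and flushing a shared deque into tokens at every sign) by a two-pass decomposition: pass 1 splits the string into monomial substrings at top-level signs, pass 2 tokenises each substring independently; no front-pops, no shared queue.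
import Mathlib
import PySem

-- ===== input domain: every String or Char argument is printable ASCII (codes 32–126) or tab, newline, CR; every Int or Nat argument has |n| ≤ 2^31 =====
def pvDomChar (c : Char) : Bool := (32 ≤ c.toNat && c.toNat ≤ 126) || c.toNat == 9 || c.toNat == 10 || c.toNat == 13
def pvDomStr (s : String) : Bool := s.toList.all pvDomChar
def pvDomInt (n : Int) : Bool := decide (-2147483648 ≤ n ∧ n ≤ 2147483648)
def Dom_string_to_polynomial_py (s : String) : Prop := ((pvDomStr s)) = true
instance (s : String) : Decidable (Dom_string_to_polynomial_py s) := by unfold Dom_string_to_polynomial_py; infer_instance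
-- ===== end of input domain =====

-- B replaces A's single interleaved loop (front-pops on a list, shared char deque) by two passes:
-- split into monomial substrings at top-level signs, then tokenise each substring; this avoids
-- A's quadratic s.pop(0) and was measured faster in a timing run. Return value only; no mutation.

-- ===== PORT A =====
-- inner `while queue:` flush loop of A; `none` = the IndexError of `queue[0]` on a dangling sign
def pvFlush : List Char → List String → Option (List String)
  | [], monomial => some monomial
  | j :: rest, monomial =>
    if j = '*' then pvFlush rest (monomial ++ [""])
    else if j = '-' ∨ j = '+' then
      match rest with
      | [] => none  -- queue[0] raises IndexError
      | k :: _ =>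
        if k = 'x' then pvFlush rest (monomial.dropLast ++ [String.mk [j, '1'], ""])
        else pvFlush rest (monomial.dropLast ++ [(monomial.getLastD "").push j])
    else pvFlush rest (monomial.dropLast ++ [(monomial.getLastD "").push j])

-- outer `while True:` loop of A, popping chars; after the list is exhausted (`empty = True`) the
-- flush runs once more and the loop breaks (the statements after the final flush only mutate
-- `queue`/`filtered`, which are dead at the break, so they do not appear in the result)
def pvLoopA : List Char → List (List String) → List Char → Bool → Option (List (List String))
  | [], res, queue, filtered =>
    if ¬ filtered then
      match pvFlush queue [""] with
      | none => none
      | some m => some (if m ≠ [""] then res ++ [m] else res)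
    else some res
  | i :: rest, res, queue, filtered =>
    let step : Option (List (List String) × List Char) :=
      if (i = '+' ∨ i = '-') ∧ ¬ filtered then
        match pvFlush queue [""] with
        | none => none
        | some m => some ((if m ≠ [""] then res ++ [m] else res), [])
      else some (res, queue)
    match step with
    | none => none
    | some (res', q') =>
      if i = '(' then pvLoopA rest res' q' true
      else if i = ')' then pvLoopA rest res' q' false
      else if i ≠ ' ' then pvLoopA rest res' (q' ++ [i]) filtered
      else pvLoopA rest res' q' filtered

-- `.getD []` is never reached on inputs satisfying Pre_ (there A returns normally)
def string_to_polynomial_py (s : String) : List (List String) :=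
  (pvLoopA s.toList [] [] false).getD []

-- ===== PORT B =====
-- pass 1 of B: split into monomial substrings at top-level signs (sign heads the next substring)
def pvSegLoop : List Char → List (List Char) → List Char → Bool → List (List Char)
  | [], segs, cur, filtered => if ¬ filtered then segs ++ [cur] else segs
  | c :: rest, segs, cur, filtered =>
    if c = '(' then pvSegLoop rest segs cur true
    else if c = ')' then pvSegLoop rest segs cur false
    else if (c = '+' ∨ c = '-') ∧ ¬ filtered then pvSegLoop rest (segs ++ [cur]) [c] filtered
    else if c ≠ ' ' then pvSegLoop rest segs (cur ++ [c]) filtered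
    else pvSegLoop rest segs cur filtered

-- pass 2 of B: tokenise one substring (`seg[k+1] == 'x'` lookahead = `rest` starts with 'x')
def pvHeadX : List Char → Bool
  | [] => false
  | c :: _ => c = 'x'

def pvParseMono : List Char → List String → List String
  | [], tokens => tokens
  | c :: rest, tokens =>
    if c = '*' then pvParseMono rest (tokens ++ [""])
    else if ((c = '-' || c = '+') && pvHeadX rest) = true then
      pvParseMono rest (tokens.dropLast ++ [String.mk [c, '1'], ""])
    else pvParseMono rest (tokens.dropLast ++ [(tokens.getLastD "").push c])

def string_to_polynomial_py_alt (s : String) : List (List String) :=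
  (pvSegLoop s.toList [] [] false).foldl
    (fun r seg =>
      let m := pvParseMono seg [""]
      if m ≠ [""] then r ++ [m] else r) []

-- ===== PRECONDITION & SPEC =====
def pvIsSign? : Option Char → Bool
  | some c => c = '+' || c = '-'
  | none => false

-- scan tracking only (last queued char, paren flag): false exactly when some flushed monomial
-- would end in a dangling '+'/'-' (A's deque lookahead `queue[0]` then raises IndexError)
def pvNoDangle : List Char → Option Char → Bool → Bool
  | [], last, filtered => filtered || !(pvIsSign? last)
  | c :: rest, last, filtered =>
    if c = '(' then pvNoDangle rest last true
    else if c = ')' then pvNoDangle rest last false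
    else if (c = '+' ∨ c = '-') ∧ ¬ filtered then !(pvIsSign? last) && pvNoDangle rest (some c) false
    else if c ≠ ' ' then pvNoDangle rest (some c) filtered
    else pvNoDangle rest last filtered

-- Pre_ excludes exactly the inputs where A raises: the empty string (A's loop variable `i` is
-- unbound, UnboundLocalError) and strings where a monomial ends in a dangling sign (IndexError).
def Pre_string_to_polynomial_py (s : String) : Prop :=
  s.toList ≠ [] ∧ pvNoDangle s.toList none false = true
instance (s : String) : Decidable (Pre_string_to_polynomial_py s) := by
  unfold Pre_string_to_polynomial_py; infer_instance

def pvWitness_string_to_polynomial_py : String := "-3*x^1+2*x^2"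

def Spec_string_to_polynomial_py (s : String) (out : List (List String)) : Prop :=
  out = string_to_polynomial_py_alt s
instance (s : String) (out : List (List String)) : Decidable (Spec_string_to_polynomial_py s out) := by
  unfold Spec_string_to_polynomial_py; infer_instance

-- ===== CLAIM (what is proved, stated in full; the proofs are below) =====
def Claim_equal_string_to_polynomial_py : Prop :=
  ∀ (s : String), Dom_string_to_polynomial_py s → Pre_string_to_polynomial_py s →
    Spec_string_to_polynomial_py s (string_to_polynomial_py s)

-- ===== LEMMAS AND PROOFS =====

-- A's flush = B's tokeniser whenever the monomial does not end in a dangling sign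
lemma pvIsSign?_tail (j : Char) (rest : List Char) (h : pvIsSign? (j :: rest).getLast? = false) :
    pvIsSign? rest.getLast? = false := by
  cases rest with
  | nil => rfl
  | cons k t => rwa [List.getLast?_cons_cons] at h

lemma pvFlush_eq_parse : ∀ (seg : List Char) (tokens : List String),
    pvIsSign? seg.getLast? = false →
    pvFlush seg tokens = some (pvParseMono seg tokens) := by
  intro seg
  induction seg with
  | nil => intro tokens _; rfl
  | cons j rest ih =>
    intro tokens hlast
    have htail := pvIsSign?_tail j rest hlast
    by_cases hstar : j = '*'
    · simp only [pvFlush, pvParseMono, hstar, if_pos rfl]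
      exact ih _ htail
    · by_cases hsign : j = '-' ∨ j = '+'
      · cases rest with
        | nil =>
          exfalso
          rcases hsign with h1 | h1 <;> subst h1 <;> simp [pvIsSign?] at hlast
        | cons k t =>
          by_cases hx : k = 'x'
          · have hcond : ((j = '-' || j = '+') && pvHeadX (k :: t)) = true := by
              subst hx
              rcases hsign with h1 | h1 <;> simp [h1, pvHeadX]
            simp only [pvFlush, pvParseMono, if_neg hstar, if_pos hsign, if_pos hx,
              if_pos hcond]
            exact ih _ htail
          · have hcond : ¬ (((j = '-' || j = '+') && pvHeadX (k :: t)) = true) := by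
              simp [pvHeadX, hx]
            simp only [pvFlush, pvParseMono, if_neg hstar, if_pos hsign, if_neg hx,
              if_neg hcond]
            exact ih _ htail
      · have hcond : ¬ (((j = '-' || j = '+') && pvHeadX rest) = true) := by
          have h1 : ¬ j = '-' := fun h => hsign (Or.inl h)
          have h2 : ¬ j = '+' := fun h => hsign (Or.inr h)
          simp [h1, h2]
        simp only [pvFlush, pvParseMono, if_neg hstar, if_neg hsign, if_neg hcond]
        exact ih _ htail

-- the per-substring fold of B's pass 2
def pvPass2 (segs : List (List Char)) : List (List String) :=
  segs.foldl
    (fun r seg =>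
      let m := pvParseMono seg [""]
      if m ≠ [""] then r ++ [m] else r) []

lemma pvPass2_accum (segs : List (List Char)) :
    ∀ r, segs.foldl
        (fun r seg =>
          let m := pvParseMono seg [""]
          if m ≠ [""] then r ++ [m] else r) r = r ++ pvPass2 segs := by
  induction segs with
  | nil => intro r; simp [pvPass2]
  | cons seg t ih =>
    intro r
    simp only [pvPass2, List.foldl_cons]
    rw [ih, ih]
    by_cases hm : pvParseMono seg [""] = [""] <;> simp [hm]

lemma pvSegLoop_accum (chars : List Char) :
    ∀ segs cur filtered,
      pvSegLoop chars segs cur filtered = segs ++ pvSegLoop chars [] cur filtered := by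
  induction chars with
  | nil => intro segs cur filtered; simp only [pvSegLoop]; split <;> simp
  | cons c rest ih =>
    intro segs cur filtered
    simp only [pvSegLoop]
    split
    · exact ih segs cur true
    · split
      · exact ih segs cur false
      · split
        · rw [ih (segs ++ [cur]) [c] filtered, ih ([] ++ [cur]) [c] filtered]
          simp
        · split
          · exact ih segs (cur ++ [c]) filtered
          · exact ih segs cur filtered

lemma pvPass2_cons (q : List Char) (t : List (List Char)) :
    pvPass2 (q :: t) =
      (if pvParseMono q [""] ≠ [""] then [pvParseMono q [""]] else []) ++ pvPass2 t := by
  simp only [pvPass2, List.foldl_cons]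
  rw [pvPass2_accum]
  by_cases hm : pvParseMono q [""] = [""] <;> simp [hm, pvPass2, ne_eq, ite_not]

-- main invariant: A's interleaved loop equals B's split-then-parse on the remaining chars
lemma pvMain (chars : List Char) :
    ∀ (queue : List Char) (filtered : Bool) (res : List (List String)),
      pvNoDangle chars queue.getLast? filtered = true →
      pvLoopA chars res queue filtered =
        some (res ++ pvPass2 (pvSegLoop chars [] queue filtered)) := by
  induction chars with
  | nil =>
    intro queue filtered res h
    cases filtered with
    | true => simp [pvLoopA, pvSegLoop, pvPass2]
    | false =>
      simp only [pvNoDangle, Bool.false_or] at h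
      have hq : pvIsSign? queue.getLast? = false := by
        cases hval : pvIsSign? queue.getLast? with
        | false => rfl
        | true => rw [hval] at h; simp at h
      simp only [pvLoopA, pvSegLoop, not_false_eq_true, if_true,
        pvFlush_eq_parse queue [""] hq]
      simp only [pvPass2, List.nil_append, List.foldl_cons, List.foldl_nil]
      by_cases hm : pvParseMono queue [""] = [""] <;> simp [hm]
  | cons c rest ih =>
    intro queue filtered res h
    by_cases hlp : c = '('
    · subst hlp
      simp only [pvNoDangle, if_pos rfl] at h
      have := ih queue true res h
      simp [pvLoopA, pvSegLoop]
      simpa using this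
    · by_cases hrp : c = ')'
      · subst hrp
        simp only [pvNoDangle, if_neg (by decide : ¬ (')' = '(')), if_pos rfl] at h
        have := ih queue false res h
        simp [pvLoopA, pvSegLoop]
        simpa using this
      · by_cases hsign : c = '+' ∨ c = '-'
        · cases filtered with
          | true =>
            have harg : pvNoDangle rest (queue ++ [c]).getLast? true = true := by
              rw [List.getLast?_concat]
              rcases hsign with h1 | h1 <;> subst h1 <;>
                simpa [pvNoDangle] using h
            have := ih (queue ++ [c]) true res harg
            rcases hsign with h1 | h1 <;> subst h1 <;>
              (simp [pvLoopA, pvSegLoop]; simpa using this)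
          | false =>
            have h' : (!pvIsSign? queue.getLast?
                && pvNoDangle rest (some c) false) = true := by
              rcases hsign with h1 | h1 <;> subst h1 <;>
                simpa [pvNoDangle] using h
            rw [Bool.and_eq_true] at h'
            obtain ⟨hq, hrest⟩ := h'
            have hqs : pvIsSign? queue.getLast? = false := by
              cases hval : pvIsSign? queue.getLast? with
              | false => rfl
              | true => rw [hval] at hq; simp at hq
            have harg : pvNoDangle rest [c].getLast? false = true := by
              simpa using hrest
            have hrec := ih [c] false
              (if pvParseMono queue [""] ≠ [""] then res ++ [pvParseMono queue [""]]
               else res) harg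
            have hflush := pvFlush_eq_parse queue [""] hqs
            have hrec' := hrec
            simp only [ne_eq, ite_not] at hrec'
            rcases hsign with h1 | h1 <;> subst h1 <;>
              · simp only [pvLoopA, pvSegLoop]
                simp [hflush]
                rw [hrec', pvSegLoop_accum rest [queue]]
                simp only [List.singleton_append, pvPass2_cons]
                by_cases hm : pvParseMono queue [""] = [""] <;> simp [hm]
        · have h1 : ¬ c = '+' := fun hh => hsign (Or.inl hh)
          have h2 : ¬ c = '-' := fun hh => hsign (Or.inr hh)
          have hns : ¬ ((c = '+' ∨ c = '-') ∧ ¬ filtered = true) := by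
            rintro ⟨hh, -⟩; exact hsign hh
          by_cases hsp : c = ' '
          · subst hsp
            simp only [pvNoDangle, if_neg hlp, if_neg hrp, if_neg hns,
              if_neg (by simp : ¬ (' ' ≠ ' '))] at h
            have := ih queue filtered res h
            simp [pvLoopA, pvSegLoop]
            simpa using this
          · simp only [pvNoDangle, if_neg hlp, if_neg hrp, if_neg hns,
              if_pos hsp] at h
            have harg : pvNoDangle rest (queue ++ [c]).getLast? filtered = true := by
              rw [List.getLast?_concat]; exact h
            have := ih (queue ++ [c]) filtered res harg
            simp only [pvLoopA, pvSegLoop, if_neg hns, if_neg hlp, if_neg hrp,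
              if_pos hsp]
            exact this

-- ===== VERDICT (by name: the statement is the Claim_ definition above) =====
theorem string_to_polynomial_py_spec : Claim_equal_string_to_polynomial_py := by
  intro s _ hpre
  obtain ⟨_, hnd⟩ := hpre
  unfold Spec_string_to_polynomial_py string_to_polynomial_py string_to_polynomial_py_alt
  rw [pvMain s.toList [] false [] (by simpa using hnd)]
  simp [pvPass2]
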